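-- pv_equiv track=rewrite | github.com/pushparani7/GreenRoute-Ai | app/complexity_scorer.py | score_patterns
-- ===== SOURCE A (Python) =====
-- def score_patterns(query: str) -> int:
--     """Score based on common patterns"""
--     query_lower = query.lower()
--     score = 0
--
--     # Code-related patterns
--     code_patterns = ["function", "method", "class", "loop", "array", "variable"]
--     score += sum(1 for p in code_patterns if p in query_lower) * 3
--
--     # Analysis patterns
--     analysis_patterns = ["trend", "pattern", "relationship", "correlation"]
--     score += sum(1 for p in analysis_patterns if p in query_lower) * 2
--
--     # Creative patterns
--     creative_patterns = ["story", "poem", "essay", "creative", "imagine"]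
--     score += sum(1 for p in creative_patterns if p in query_lower) * 3
--
--     return score
-- ===== SOURCE B (Python) =====
-- # Text-driven scan: walk the query once position by position, matching still-pending
-- # patterns where they start and removing each pattern once found (early exit when none remain),
-- # instead of A's pattern-driven membership tests ("p in query") per group.
-- _CODE = ["function", "method", "class", "loop", "array", "variable"]
-- _ANALYSIS = ["trend", "pattern", "relationship", "correlation"]
-- _CREATIVE = ["story", "poem", "essay", "creative", "imagine"]
--
--
-- def score_patterns(query: str) -> int:
--     text = query.lower()
--     pending = [(p, 3) for p in _CODE] + [(p, 2) for p in _ANALYSIS] + [(p, 3) for p in _CREATIVE]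
--     score = 0
--     for i in range(len(text)):
--         if not pending:
--             break
--         score += sum(w for p, w in pending if text.startswith(p, i))
--         pending = [(p, w) for p, w in pending if not text.startswith(p, i)]
--     return score
-- ===== Notes on version B (the rewrite author's own statement) =====
-- stated objective: alternative
-- what changed: Instead of testing each pattern for membership in the query group by group, B scans the lowercased query left to right once, at each position adding the weights of the still-pending patterns that start there and removing them from the pending set, stopping early when no patterns remain.
import Mathlib
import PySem

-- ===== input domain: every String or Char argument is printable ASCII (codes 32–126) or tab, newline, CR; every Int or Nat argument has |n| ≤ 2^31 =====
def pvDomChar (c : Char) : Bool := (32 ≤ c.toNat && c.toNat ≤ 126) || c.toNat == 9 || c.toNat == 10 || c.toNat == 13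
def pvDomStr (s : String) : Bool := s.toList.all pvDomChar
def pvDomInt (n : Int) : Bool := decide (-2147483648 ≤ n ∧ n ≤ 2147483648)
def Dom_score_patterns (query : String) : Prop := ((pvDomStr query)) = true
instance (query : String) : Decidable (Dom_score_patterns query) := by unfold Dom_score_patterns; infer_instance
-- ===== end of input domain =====

-- B replaces A's per-group pattern-membership sums by a single left-to-right scan of the
-- lowercased query that matches and retires pending patterns at each position (objective: alternative).

-- ===== PORT A =====
def score_patterns (query : String) : Int :=
  let query_lower := PySem.Str.lower query
  let score : Int := 0
  let code_patterns : List String := ["function", "method", "class", "loop", "array", "variable"]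
  let score := score + (code_patterns.foldl (fun acc p => if PySem.Str.isIn p query_lower then acc + 1 else acc) (0 : Int)) * 3
  let analysis_patterns : List String := ["trend", "pattern", "relationship", "correlation"]
  let score := score + (analysis_patterns.foldl (fun acc p => if PySem.Str.isIn p query_lower then acc + 1 else acc) (0 : Int)) * 2
  let creative_patterns : List String := ["story", "poem", "essay", "creative", "imagine"]
  let score := score + (creative_patterns.foldl (fun acc p => if PySem.Str.isIn p query_lower then acc + 1 else acc) (0 : Int)) * 3
  score

-- ===== PORT B =====
-- pending list built exactly as Source B builds it (three comprehensions concatenated)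
def pvPending : List (List Char × Int) :=
  (["function", "method", "class", "loop", "array", "variable"].map (fun p => (p.toList, (3 : Int))))
    ++ (["trend", "pattern", "relationship", "correlation"].map (fun p => (p.toList, (2 : Int))))
    ++ (["story", "poem", "essay", "creative", "imagine"].map (fun p => (p.toList, (3 : Int))))

-- the loop over positions i of text: 'text.startswith(p, i)' is 'p prefix of the i-th suffix'
def pvScan (pending : List (List Char × Int)) (score : Int) : List Char → Int
  | [] => score
  | c :: rest =>
    if pending.isEmpty then score
    else
      pvScan (pending.filter (fun pw => !(pw.1.isPrefixOf (c :: rest))))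
        (score + ((pending.filter (fun pw => pw.1.isPrefixOf (c :: rest))).map Prod.snd).sum)
        rest

def score_patterns_alt (query : String) : Int :=
  let text := PySem.Str.lower query
  pvScan pvPending 0 text.toList

-- ===== PRECONDITION & SPEC =====
def Spec_score_patterns (query : String) (out : Int) : Prop := out = score_patterns_alt query
instance (query : String) (out : Int) : Decidable (Spec_score_patterns query out) := by unfold Spec_score_patterns; infer_instance

-- ===== CLAIM =====
def Claim_equal_score_patterns : Prop := ∀ (query : String), Dom_score_patterns query → Spec_score_patterns query (score_patterns query)

-- ===== LEMMAS AND PROOFS =====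

-- 'p occurs in t starting at some position i < t.length' (the scan's notion of occurrence)
def pvOcc (p : List Char) : List Char → Bool
  | [] => false
  | c :: rest => p.isPrefixOf (c :: rest) || pvOcc p rest

theorem pvOcc_iff_infix (p : List Char) (hp : p ≠ []) (t : List Char) :
    pvOcc p t = true ↔ p <:+: t := by
  induction t with
  | nil => simp [pvOcc, List.infix_nil, hp]
  | cons c rest ih =>
    simp [pvOcc, List.infix_cons_iff, ih, List.isPrefixOf_iff_prefix]

theorem pvOcc_eq_isIn (p : List Char) (hp : p ≠ []) (t : List Char) :
    pvOcc p t = PySem.Chars.isIn p t := by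
  rcases h : PySem.Chars.isIn p t with _ | _
  · rw [PySem.Chars.isIn_eq_false_iff] at h
    rcases hh : pvOcc p t with _ | _
    · rfl
    · exact absurd ((pvOcc_iff_infix p hp t).mp hh) h
  · rw [PySem.Chars.isIn_iff_infix] at h
    exact (pvOcc_iff_infix p hp t).mpr h

-- splitting a weighted if-sum along a boolean predicate on the pairs
theorem pv_sum_split (pending : List (List Char × Int)) (f : List Char × Int → Bool)
    (g : List Char × Int → Int) :
    (pending.map (fun pw => if f pw then pw.2 else g pw)).sum
      = ((pending.filter f).map Prod.snd).sum
        + ((pending.filter (fun pw => !(f pw))).map g).sum := by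
  induction pending with
  | nil => simp
  | cons hd tl ih =>
    rcases h : f hd with _ | _ <;> simp [h, ih] <;> ring

-- the scan computes the weighted occurrence sum over the pending patterns
theorem pvScan_eq (t : List Char) :
    ∀ (pending : List (List Char × Int)) (s : Int),
    pvScan pending s t = s + (pending.map (fun pw => if pvOcc pw.1 t then pw.2 else 0)).sum := by
  induction t with
  | nil => intro pending s; simp [pvScan, pvOcc]
  | cons c rest ih =>
    intro pending s
    rcases hp : pending.isEmpty with _ | _
    · simp only [pvScan, hp, Bool.false_eq_true, if_false, ih]
      have hsplit := pv_sum_split pending (fun pw => pw.1.isPrefixOf (c :: rest))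
        (fun pw => if pvOcc pw.1 rest then pw.2 else 0)
      have : (pending.map (fun pw => if pvOcc pw.1 (c :: rest) then pw.2 else 0)).sum
          = (pending.map (fun pw => if pw.1.isPrefixOf (c :: rest) then pw.2
              else if pvOcc pw.1 rest then pw.2 else 0)).sum := by
        congr 1; apply List.map_congr_left; intro pw _
        rcases h1 : pw.1.isPrefixOf (c :: rest) with _ | _ <;> simp [pvOcc, h1]
      rw [this, hsplit]; ring
    · rw [List.isEmpty_iff] at hp; subst hp; simp [pvScan]

theorem pv_ite_acc_add (b : Bool) (a w : Int) :
    (if b = true then a + w else a) = a + (if b = true then w else 0) := by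
  cases b <;> simp

theorem pv_ite_one_mul (b : Bool) (w : Int) :
    (if b = true then (1 : Int) else 0) * w = if b = true then w else 0 := by
  cases b <;> simp

-- ===== VERDICT =====
theorem score_patterns_spec : Claim_equal_score_patterns := by
  intro query _
  unfold Spec_score_patterns score_patterns score_patterns_alt
  rw [pvScan_eq]
  simp only [pvPending, List.map_append, List.sum_append,
    List.map, List.sum_cons, List.sum_nil]
  rw [pvOcc_eq_isIn _ (by decide), pvOcc_eq_isIn _ (by decide), pvOcc_eq_isIn _ (by decide),
    pvOcc_eq_isIn _ (by decide), pvOcc_eq_isIn _ (by decide), pvOcc_eq_isIn _ (by decide),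
    pvOcc_eq_isIn _ (by decide), pvOcc_eq_isIn _ (by decide), pvOcc_eq_isIn _ (by decide),
    pvOcc_eq_isIn _ (by decide), pvOcc_eq_isIn _ (by decide), pvOcc_eq_isIn _ (by decide),
    pvOcc_eq_isIn _ (by decide), pvOcc_eq_isIn _ (by decide), pvOcc_eq_isIn _ (by decide)]
  simp only [List.foldl, pv_ite_acc_add, PySem.Str.isIn_eq]
  simp only [add_mul, zero_add, pv_ite_one_mul]
  ring
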